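-- pv_equiv track=rewrite | github.com/ctc316/algorithm-python | Lintcode/Ladder_all_G_OA/1627. Word Segmentation.py | wordSegmentation
-- ===== SOURCE A (Python) =====
-- def wordSegmentation(s, k):
--     res = []
--     i = 0
--     words = s.split(" ")
--     n = len(words)
--     while i < n:
--         line = words[i]
--         j = i + 1
--         while j < n:
--             if len(line) + len(words[j]) < k:
--                 line += " " + words[j]
--                 j += 1
--             else:
--                 break
--
--         res.append(line)
--         i = j
--
--     return res
-- ===== SOURCE B (Python) =====
-- def wordSegmentation(s, k):
--     words = s.split(" ")
--     n = len(words)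
--     # prefix sums of word lengths: P[j] = len(words[0]) + ... + len(words[j-1])
--     P = [0]
--     acc = 0
--     for w in words:
--         acc += len(w)
--         P.append(acc)
--     # a line starting at word i and holding words i..j-1 has length
--     # P[j] - P[i] + (j - i - 1); the key P[j+1] + j is nondecreasing in j, so the
--     # greedy stop index is found by binary search for the first j with
--     # P[j+1] + j >= k + P[i] + i + 1
--     res = []
--     i = 0
--     while i < n:
--         t = k + P[i] + i + 1
--         lo, hi = i + 1, n
--         while lo < hi:
--             mid = (lo + hi) // 2
--             if P[mid + 1] + mid < t:
--                 lo = mid + 1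
--             else:
--                 hi = mid
--         res.append(" ".join(words[i:lo]))
--         i = lo
--     return res
-- ===== Notes on version B (the rewrite author's own statement) =====
-- stated objective: alternative
-- what changed: Instead of growing each line string word by word in a nested scan, B precomputes prefix sums of word lengths and finds each line's greedy stop index by binary search on the monotone key P[j+1]+j, then emits the line as a join of the word slice.
import Mathlib
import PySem

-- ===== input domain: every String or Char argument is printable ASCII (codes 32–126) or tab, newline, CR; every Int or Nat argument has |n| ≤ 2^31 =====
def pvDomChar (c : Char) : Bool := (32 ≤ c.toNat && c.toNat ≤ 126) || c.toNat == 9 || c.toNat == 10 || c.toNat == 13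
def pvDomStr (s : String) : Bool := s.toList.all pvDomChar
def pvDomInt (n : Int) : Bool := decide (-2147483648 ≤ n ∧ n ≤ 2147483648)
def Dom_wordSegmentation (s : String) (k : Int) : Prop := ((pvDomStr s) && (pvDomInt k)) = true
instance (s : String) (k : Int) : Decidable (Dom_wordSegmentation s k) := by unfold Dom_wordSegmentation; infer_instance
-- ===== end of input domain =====

-- B replaces A's word-by-word string growth inside a nested scan by prefix sums of the
-- word lengths plus a binary search for each line's greedy stop index, emitting every
-- line as one join of a word slice; objective: alternative algorithm, same result.

-- ===== PORT A =====
-- inner while loop of A: while j < n: if len(line)+len(words[j]) < k then extend line else break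
def segInnerA (words : List String) (n : Nat) (k : Int) (line : String) (j : Nat) : String × Nat :=
  if _h : j < n then
    if (PySem.Str.len line : Int) + PySem.Str.len (words.getD j "") < k then
      segInnerA words n k (line ++ " " ++ words.getD j "") (j + 1)
    else (line, j)
  else (line, j)
termination_by n - j

theorem segInnerA_ge (words : List String) (n : Nat) (k : Int) (line : String) (j : Nat) :
    j ≤ (segInnerA words n k line j).2 := by
  fun_induction segInnerA words n k line j with
  | case1 line j h hf ih => omega
  | case2 => simp
  | case3 => simp

-- outer while loop of A
def segOuterA (words : List String) (n : Nat) (k : Int) (i : Nat) (res : List String) : List String :=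
  if _h : i < n then
    let line := words.getD i ""
    let p := segInnerA words n k line (i + 1)
    segOuterA words n k p.2 (res ++ [p.1])
  else res
termination_by n - i
decreasing_by
  have := segInnerA_ge words n k (words.getD i "") (i + 1)
  omega

def wordSegmentation (s : String) (k : Int) : List String :=
  let words := (PySem.Str.split? s " ").getD []
  segOuterA words words.length k 0 []

-- ===== PORT B =====
-- prefix-sum loop of B: acc runs over the words, P collects the running totals
def buildP (acc : Int) : List String → List Int
  | [] => []
  | w :: rest => (acc + PySem.Str.len w) :: buildP (acc + PySem.Str.len w) rest

-- B's inner binary search: first j in [lo, hi) with P[j+1] + j >= t (or hi);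
-- fuel = hi - lo at the call makes the recursion structural
def bsearchB (P : List Int) (t : Int) : Nat → Nat → Nat → Nat
  | 0, lo, _ => lo
  | fuel + 1, lo, hi =>
      if lo < hi then
        let mid := (lo + hi) / 2
        if P.getD (mid + 1) 0 + (mid : Int) < t then bsearchB P t fuel (mid + 1) hi
        else bsearchB P t fuel lo mid
      else lo

-- outer while loop of B (fuel = n - i at the call)
def segOuterB (words : List String) (P : List Int) (n : Nat) (k : Int) :
    Nat → Nat → List String → List String
  | 0, _, res => res
  | fuel + 1, i, res =>
      if i < n then
        let j := bsearchB P (k + P.getD i 0 + i + 1) (n - (i + 1)) (i + 1) n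
        segOuterB words P n k fuel j
          (res ++ [PySem.Str.join " " (PySem.List.slice words (some (i : Int)) (some (j : Int)))])
      else res

def wordSegmentation_alt (s : String) (k : Int) : List String :=
  let words := (PySem.Str.split? s " ").getD []
  segOuterB words ((0 : Int) :: buildP 0 words) words.length k words.length 0 []

-- ===== PRECONDITION & SPEC =====
def Spec_wordSegmentation (s : String) (k : Int) (out : List String) : Prop := out = wordSegmentation_alt s k
instance (s : String) (k : Int) (out : List String) : Decidable (Spec_wordSegmentation s k out) := by unfold Spec_wordSegmentation; infer_instance

-- ===== CLAIM (what is proved, stated in full; the proofs are below) =====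
def Claim_equal_wordSegmentation : Prop := ∀ (s : String) (k : Int), Dom_wordSegmentation s k → Spec_wordSegmentation s k (wordSegmentation s k)

-- ===== LEMMAS AND PROOFS =====

-- Slen ws j = total length of the first j words
def Slen (ws : List String) (j : Nat) : Int := ((ws.take j).map PySem.Str.len).sum

-- the words of the line [i, j)
def seg (ws : List String) (i j : Nat) : List String := (ws.drop i).take (j - i)

-- the line string A builds for [i, j) and B emits for [i, j)
def joinW (ws : List String) (i j : Nat) : String := PySem.Str.join " " (seg ws i j)

theorem Slen_mono (ws : List String) {a b : Nat} (h : a ≤ b) : Slen ws a ≤ Slen ws b := by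
  unfold Slen
  conv_rhs => rw [← List.take_append_drop a (ws.take b)]
  rw [List.map_append, List.sum_append, List.take_take, Nat.min_eq_left h]
  have : 0 ≤ (((ws.take b).drop a).map PySem.Str.len).sum := by
    apply List.sum_nonneg
    intro x hx
    simp only [List.mem_map] at hx
    obtain ⟨s, _, rfl⟩ := hx
    simp [PySem.Str.len_eq]
  omega

theorem Slen_succ (ws : List String) (j : Nat) (h : j < ws.length) :
    Slen ws (j + 1) = Slen ws j + PySem.Str.len (ws.getD j "") := by
  unfold Slen
  rw [List.take_add_one, List.map_append, List.sum_append, List.getElem?_eq_getElem h]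
  simp [List.getD_eq_getElem?_getD, List.getElem?_eq_getElem h]

theorem sum_seg (ws : List String) (i j : Nat) (hij : i ≤ j) :
    ((seg ws i j).map PySem.Str.len).sum = Slen ws j - Slen ws i := by
  unfold seg Slen
  rw [← List.drop_take]
  conv_rhs => rw [← List.take_append_drop i (ws.take j)]
  rw [List.map_append, List.sum_append, List.take_take, Nat.min_eq_left hij]
  ring

theorem seg_length (ws : List String) (i j : Nat) (hj : j ≤ ws.length) :
    (seg ws i j).length = j - i := by
  unfold seg
  simp only [List.length_take, List.length_drop]
  omega

theorem seg_ne_nil (ws : List String) (i j : Nat) (hij : i < j) (hi : i < ws.length) :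
    seg ws i j ≠ [] := by
  unfold seg
  intro h
  have := congrArg List.length h
  simp only [List.length_take, List.length_drop, List.length_nil] at this
  omega

-- length of a space-join (Chars level, then Str level)
theorem chars_join_len (l : List (List Char)) (hl : l ≠ []) :
    (PySem.Chars.join [' '] l).length + 1 = (l.map List.length).sum + l.length := by
  induction l with
  | nil => simp at hl
  | cons x rest ih =>
      cases rest with
      | nil => simp [PySem.Chars.join_singleton]
      | cons y r =>
          rw [PySem.Chars.join_cons_cons, List.length_append, List.length_append]
          have ih' := ih (by simp)
          simp only [List.map_cons, List.sum_cons, List.length_cons, List.length_nil] at ih' ⊢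
          omega

theorem len_sum_cast (l : List String) :
    (((l.map String.toList).map List.length).sum : Int) = (l.map PySem.Str.len).sum := by
  induction l with
  | nil => simp
  | cons x rest ih => simp only [List.map_cons, List.sum_cons, PySem.Str.len_eq]; push_cast [ih]; ring

theorem joinW_len (ws : List String) (i j : Nat) (hij : i < j) (hj : j ≤ ws.length) :
    PySem.Str.len (joinW ws i j) = Slen ws j - Slen ws i + (j : Int) - i - 1 := by
  unfold joinW
  rw [PySem.Str.len_eq, PySem.Str.toList_join]
  have hs : (" " : String).toList = [' '] := rfl
  have hjl := chars_join_len ((seg ws i j).map String.toList) (by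
    intro h
    exact seg_ne_nil ws i j hij (by omega) (by simpa using congrArg List.length h))
  rw [hs]
  have hone : 1 ≤ (seg ws i j).length := by
    have := seg_length ws i j hj
    omega
  have hsum := len_sum_cast (seg ws i j)
  rw [sum_seg ws i j (by omega)] at hsum
  have h2 : Slen ws i ≤ Slen ws j := Slen_mono ws (le_of_lt hij)
  have hL := seg_length ws i j hj
  rw [List.length_map] at hjl
  omega

-- snoc for a space-join (Chars level, then Str level)
theorem chars_join_snoc (sep : List Char) (l : List (List Char)) (y : List Char) (hl : l ≠ []) :
    PySem.Chars.join sep (l ++ [y]) = PySem.Chars.join sep l ++ sep ++ y := by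
  induction l with
  | nil => simp at hl
  | cons x rest ih =>
      cases rest with
      | nil => simp [PySem.Chars.join_cons_cons, PySem.Chars.join_singleton]
      | cons a r =>
          have h1 : (x :: a :: r) ++ [y] = x :: a :: (r ++ [y]) := by simp
          have h2 : (a :: r) ++ [y] = a :: (r ++ [y]) := by simp
          rw [h1, PySem.Chars.join_cons_cons, ← h2, ih (by simp), PySem.Chars.join_cons_cons]
          simp

theorem seg_succ (ws : List String) (i j : Nat) (hij : i ≤ j) (hj : j < ws.length) :
    seg ws i (j + 1) = seg ws i j ++ [ws.getD j ""] := by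
  unfold seg
  rw [← List.drop_take, ← List.drop_take, List.take_add_one, List.getElem?_eq_getElem hj]
  rw [List.drop_append_of_le_length (by simp; omega)]
  simp [List.getD_eq_getElem?_getD, List.getElem?_eq_getElem hj]

theorem joinW_succ (ws : List String) (i j : Nat) (hij : i < j) (hj : j < ws.length) :
    joinW ws i (j + 1) = joinW ws i j ++ " " ++ ws.getD j "" := by
  apply String.toList_inj.mp
  unfold joinW
  rw [seg_succ ws i j (by omega) hj]
  simp only [PySem.Str.toList_join, List.map_append, List.map_cons, List.map_nil]
  rw [chars_join_snoc _ _ _ (by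
    intro h
    exact seg_ne_nil ws i j hij (by omega) (by simpa using congrArg List.length h))]
  simp

theorem drop_eq_getD_cons (ws : List String) (i : Nat) (h : i < ws.length) :
    ws.drop i = ws.getD i "" :: ws.drop (i + 1) := by
  rw [List.getD_eq_getElem?_getD, List.getElem?_eq_getElem h]
  simpa using (List.drop_eq_getElem_cons h).symm

theorem joinW_single (ws : List String) (i : Nat) (hi : i < ws.length) :
    joinW ws i (i + 1) = ws.getD i "" := by
  unfold joinW seg
  rw [Nat.add_sub_cancel_left, drop_eq_getD_cons ws i hi, List.take_one]
  apply String.toList_inj.mp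
  rw [PySem.Str.toList_join]
  simp [PySem.Chars.join_singleton]

-- P-lookup facts
theorem buildP_getD (ws : List String) : ∀ (acc : Int) (j : Nat), j < ws.length →
    (buildP acc ws).getD j 0 = acc + Slen ws (j + 1) := by
  induction ws with
  | nil => intro acc j h; simp at h
  | cons w rest ih =>
      intro acc j h
      cases j with
      | zero => simp [buildP, Slen]
      | succ m =>
          simp only [buildP, List.getD_cons_succ]
          rw [ih (acc + PySem.Str.len w) m (by simpa using h)]
          have : Slen (w :: rest) (m + 1 + 1) = PySem.Str.len w + Slen rest (m + 1) := by
            simp [Slen]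
          rw [this]
          ring

theorem P_getD (ws : List String) (j : Nat) (hj : j ≤ ws.length) :
    ((0 : Int) :: buildP 0 ws).getD j 0 = Slen ws j := by
  cases j with
  | zero => simp [Slen]
  | succ m =>
      simp only [List.getD_cons_succ]
      rw [buildP_getD ws 0 m (by omega)]
      ring

-- uniqueness of the first-failure index
theorem firstFail_unique (cond : Nat → Prop) (lo hi x y : Nat)
    (hx1 : lo ≤ x) (hx2 : x ≤ hi) (hxh : ∀ u, lo ≤ u → u < x → cond u) (hxe : x = hi ∨ ¬ cond x)
    (hy1 : lo ≤ y) (hy2 : y ≤ hi) (hyh : ∀ u, lo ≤ u → u < y → cond u) (hye : y = hi ∨ ¬ cond y) :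
    x = y := by
  by_contra hne
  rcases Nat.lt_or_ge x y with h | h
  · have hc := hyh x hx1 h
    rcases hxe with rfl | hnc
    · omega
    · exact hnc hc
  · have h' : y < x := by omega
    have hc := hxh y hy1 h'
    rcases hye with rfl | hnc
    · omega
    · exact hnc hc

-- what the binary search computes, given enough fuel and antitonicity of the test below hi
theorem bsearchB_spec (P : List Int) (t : Int) : ∀ (fuel lo hi : Nat), hi - lo ≤ fuel → lo ≤ hi →
    (∀ a b : Nat, a ≤ b → b < hi → P.getD (b + 1) 0 + (b : Int) < t → P.getD (a + 1) 0 + (a : Int) < t) →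
    lo ≤ bsearchB P t fuel lo hi ∧ bsearchB P t fuel lo hi ≤ hi ∧
    (∀ u, lo ≤ u → u < bsearchB P t fuel lo hi → P.getD (u + 1) 0 + (u : Int) < t) ∧
    (bsearchB P t fuel lo hi = hi ∨ ¬ (P.getD (bsearchB P t fuel lo hi + 1) 0 + (bsearchB P t fuel lo hi : Int) < t)) := by
  intro fuel
  induction fuel with
  | zero =>
      intro lo hi hf hle hmono
      have : lo = hi := by omega
      subst this
      exact ⟨le_refl _, le_refl _, fun u h1 h2 => absurd h2 (by simp [bsearchB] at h2 ⊢; omega), Or.inl rfl⟩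
  | succ m ih =>
      intro lo hi hf hle hmono
      by_cases hlt : lo < hi
      · rw [bsearchB, if_pos hlt]
        have hmid1 : lo ≤ (lo + hi) / 2 := by omega
        have hmid2 : (lo + hi) / 2 < hi := by omega
        by_cases hc : P.getD ((lo + hi) / 2 + 1) 0 + (((lo + hi) / 2 : Nat) : Int) < t
        · rw [if_pos hc]
          obtain ⟨h1, h2, h3, h4⟩ := ih ((lo + hi) / 2 + 1) hi (by omega) (by omega) hmono
          refine ⟨by omega, h2, ?_, h4⟩
          intro u hu1 hu2
          by_cases hum : u ≤ (lo + hi) / 2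
          · exact hmono u ((lo + hi) / 2) hum hmid2 hc
          · exact h3 u (by omega) hu2
        · rw [if_neg hc]
          obtain ⟨h1, h2, h3, h4⟩ := ih lo ((lo + hi) / 2) (by omega) (by omega)
            (fun a b hab hb => hmono a b hab (by omega))
          refine ⟨h1, by omega, h3, ?_⟩
          rcases h4 with heq | hn
          · right; rw [heq]; exact hc
          · right; exact hn
      · rw [bsearchB, if_neg hlt]
        have : lo = hi := by omega
        subst this
        exact ⟨le_refl _, le_refl _, fun u h1 h2 => absurd h2 (by omega), Or.inl rfl⟩

-- what A's inner loop computes: the line for [i, r) and a first-failure stop index r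
theorem segInnerA_spec (ws : List String) (k : Int) : ∀ (fuel i j : Nat),
    ws.length - j ≤ fuel → i < j → j ≤ ws.length →
    ∃ r : Nat, segInnerA ws ws.length k (joinW ws i j) j = (joinW ws i r, r) ∧
      j ≤ r ∧ r ≤ ws.length ∧
      (∀ u, j ≤ u → u < r → Slen ws (u + 1) + (u : Int) < k + Slen ws i + i + 1) ∧
      (r = ws.length ∨ ¬ (Slen ws (r + 1) + (r : Int) < k + Slen ws i + i + 1)) := by
  intro fuel
  induction fuel with
  | zero =>
      intro i j hf hij hj
      have : j = ws.length := by omega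
      subst this
      refine ⟨ws.length, ?_, le_refl _, le_refl _, by omega, Or.inl rfl⟩
      rw [segInnerA]
      simp
  | succ m ih =>
      intro i j hf hij hj
      by_cases hjn : j < ws.length
      · have hA : (PySem.Str.len (joinW ws i j) : Int) + PySem.Str.len (ws.getD j "") < k ↔
            Slen ws (j + 1) + (j : Int) < k + Slen ws i + i + 1 := by
          rw [joinW_len ws i j hij hj, Slen_succ ws j hjn]
          omega
        rw [segInnerA, dif_pos hjn]
        by_cases hc : Slen ws (j + 1) + (j : Int) < k + Slen ws i + i + 1
        · rw [if_pos (hA.mpr hc), ← joinW_succ ws i j hij hjn]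
          obtain ⟨r, heq, h1, h2, h3, h4⟩ := ih i (j + 1) (by omega) (by omega) (by omega)
          refine ⟨r, heq, by omega, h2, ?_, h4⟩
          intro u hu1 hu2
          rcases Nat.eq_or_lt_of_le hu1 with rfl | hlt
          · exact hc
          · exact h3 u (by omega) hu2
        · rw [if_neg (fun h => hc (hA.mp h))]
          exact ⟨j, rfl, le_refl _, hj, by omega, Or.inr hc⟩
      · have : j = ws.length := by omega
        subst this
        refine ⟨ws.length, ?_, le_refl _, le_refl _, by omega, Or.inl rfl⟩
        rw [segInnerA]
        simp

-- the two outer loops agree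
theorem outer_eq (ws : List String) (k : Int) : ∀ (fuel i : Nat) (res : List String),
    ws.length - i ≤ fuel →
    segOuterA ws ws.length k i res =
      segOuterB ws ((0 : Int) :: buildP 0 ws) ws.length k fuel i res := by
  intro fuel
  induction fuel with
  | zero =>
      intro i res hf
      rw [segOuterA, segOuterB]
      have : ¬ i < ws.length := by omega
      simp [this]
  | succ m ih =>
      intro i res hf
      by_cases hi : i < ws.length
      · rw [segOuterA, dif_pos hi, segOuterB, if_pos hi]
        -- A side: line = joinW ws i (i+1)
        have hline : ws.getD i "" = joinW ws i (i + 1) := (joinW_single ws i hi).symm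
        obtain ⟨r, heq, hr1, hr2, hr3, hr4⟩ := segInnerA_spec ws k (ws.length - (i + 1)) i (i + 1)
          (le_refl _) (by omega) (by omega)
        -- B side: binary search stop index
        set P : List Int := ((0 : Int) :: buildP 0 ws) with hP
        have hPi : P.getD i 0 = Slen ws i := P_getD ws i (by omega)
        set t : Int := k + P.getD i 0 + i + 1 with ht
        have hmono : ∀ a b : Nat, a ≤ b → b < ws.length →
            P.getD (b + 1) 0 + (b : Int) < t → P.getD (a + 1) 0 + (a : Int) < t := by
          intro a b hab hb hc
          rw [P_getD ws (b + 1) (by omega)] at hc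
          rw [P_getD ws (a + 1) (by omega)]
          have := Slen_mono ws (a := a + 1) (b := b + 1) (by omega)
          have : (a : Int) ≤ b := by exact_mod_cast hab
          omega
        obtain ⟨b1, b2, b3, b4⟩ := bsearchB_spec P t (ws.length - (i + 1)) (i + 1) ws.length
          (le_refl _) (by omega) hmono
        set j := bsearchB P t (ws.length - (i + 1)) (i + 1) ws.length with hj
        -- r = j by uniqueness of the first-failure index
        have hrj : r = j := by
          apply firstFail_unique (fun u => Slen ws (u + 1) + (u : Int) < k + Slen ws i + i + 1)
            (i + 1) ws.length r j hr1 hr2 hr3 hr4 b1 b2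
          · intro u hu1 hu2
            have hb := b3 u hu1 hu2
            rw [P_getD ws (u + 1) (by omega), ht, hPi] at hb
            exact hb
          · rcases b4 with hl | hn
            · exact Or.inl hl
            · by_cases hjn : j = ws.length
              · exact Or.inl hjn
              · right
                intro hcond
                apply hn
                rw [P_getD ws (j + 1) (by omega), ht, hPi]
                exact hcond
        -- emitted strings agree
        have hslice : PySem.Str.join " " (PySem.List.slice ws (some (i : Int)) (some (j : Int))) =
            joinW ws i j := by
          rw [PySem.List.slice_natCast]
          rfl
        simp only [hline, heq]
        rw [hslice, ← hrj]
        exact ih r (res ++ [joinW ws i r]) (by omega)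
      · rw [segOuterA, segOuterB]
        simp [hi]

-- ===== VERDICT (by name: the statement is the Claim_ definition above) =====
theorem wordSegmentation_spec : Claim_equal_wordSegmentation := by
  intro s k _
  simp only [Spec_wordSegmentation, wordSegmentation, wordSegmentation_alt]
  exact outer_eq ((PySem.Str.split? s " ").getD []) k ((PySem.Str.split? s " ").getD []).length 0 [] (by omega)
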